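-- pv_equiv track=rewrite | github.com/runstr/advent_of__code | Day17/day17_1.py | get_x_values
-- ===== SOURCE A (Python) =====
-- def get_x_values(x_start_min, x_min, x_max):
--     x_values = {}
--     for x_start in range(0, x_max):
--         x = 0
--         x_i = x_start
--         while x < x_max:
--             x += x_i
--             if x_i==0:
--                 break
--             if x >= x_min and x < x_max:
--                 try:
--                     x_values[x_start].append(x)
--                 except:
--                     x_values[x_start] = [x]
--             x_i-=1
--     return x_values
-- ===== SOURCE B (Python) =====
-- def _first_at_least(s, t):
--     # positions p(k) = k*s - k*(k-1)//2 are increasing for k in [1, s];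
--     # return the smallest k in [1, s] with p(k) >= t, or s + 1 if there is none.
--     if s >= t:
--         return 1  # already p(1) = s >= t
--     # p(k) >= t  <=>  k*(2*s + 1 - k) >= 2*t  (both sides doubled; k*(k-1) is even)
--     lo, hi = 1, s + 1
--     s2 = 2 * s + 1
--     t2 = 2 * t
--     while lo < hi:
--         mid = (lo + hi) // 2
--         if mid * (s2 - mid) >= t2:
--             hi = mid
--         else:
--             lo = mid + 1
--     return lo
--
--
-- def get_x_values(x_start_min, x_min, x_max):
--     # After k steps a probe launched with velocity s sits at p(k) = k*s - k*(k-1)//2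
--     # (it stops moving at k = s).  Jump by binary search to the first step k1 whose
--     # position reaches x_min, then emit positions until x_max (or step s) is hit,
--     # instead of simulating every step from 0.
--     x_values = {}
--     for s in range(0, x_max):
--         k1 = _first_at_least(s, x_min)
--         lst = []
--         p = k1 * (2 * s + 1 - k1) // 2  # p(k1)
--         k = k1
--         while p < x_max and k <= s:
--             lst.append(p)
--             p += s - k
--             k += 1
--         if lst:
--             x_values[s] = lst
--     return x_values
-- ===== Notes on version B (the rewrite author's own statement) =====
-- stated objective: alternative
-- what changed: B replaces A's per-start simulation from step 0 (mutable x, decreasing velocity, try/except dict append) with the closed form p(k)=k*s-k*(k-1)//2: a binary search jumps directly to the first step whose position reaches x_min, and a short loop then emits positions until x_max or step s is hit, inserting each start's list into the dict once.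
import Mathlib
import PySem

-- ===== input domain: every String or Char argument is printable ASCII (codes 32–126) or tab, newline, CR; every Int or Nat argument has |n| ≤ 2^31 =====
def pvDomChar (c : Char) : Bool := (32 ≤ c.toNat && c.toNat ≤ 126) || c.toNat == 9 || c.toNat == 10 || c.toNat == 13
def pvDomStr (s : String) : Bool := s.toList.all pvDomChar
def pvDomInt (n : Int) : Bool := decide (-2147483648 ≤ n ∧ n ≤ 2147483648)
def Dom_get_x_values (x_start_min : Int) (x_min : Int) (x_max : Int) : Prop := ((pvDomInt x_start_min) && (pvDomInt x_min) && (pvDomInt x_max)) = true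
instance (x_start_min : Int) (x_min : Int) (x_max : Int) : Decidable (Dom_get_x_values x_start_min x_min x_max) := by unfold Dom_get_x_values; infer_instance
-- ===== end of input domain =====

-- B computes each start's in-range positions by the closed form p(k)=k*s-k*(k-1)//2 and two
-- binary searches instead of A's step-by-step simulation; objective: alternative algorithm.

-- ===== PORT A =====
-- inner while loop of A; fuel (x_i.toNat + 1 at entry) only makes the recursion total,
-- it is never exhausted for the starts A iterates over (0 ≤ x_start)
def pvLoopA (x_min x_max x_start : Int) : Nat → Int → Int → PySem.Dict Int (List Int) → PySem.Dict Int (List Int)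
  | 0, _, _, d => d
  | fuel+1, x, x_i, d =>
    if x < x_max then
      let x' := x + x_i
      if x_i = 0 then d
      else
        let d' := if x_min ≤ x' ∧ x' < x_max then
            (match d.get? x_start with
             | some l => d.insert x_start (l ++ [x'])
             | none => d.insert x_start [x'])
          else d
        pvLoopA x_min x_max x_start fuel x' (x_i - 1) d'
    else d

def get_x_values (x_start_min : Int) (x_min : Int) (x_max : Int) : List (Int × List Int) :=
  ((PySem.List.pyRange 0 x_max 1).foldl
    (fun d x_start => pvLoopA x_min x_max x_start (x_start.toNat + 1) 0 x_start d)
    PySem.Dict.empty).items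

-- ===== PORT B =====
-- binary-search loop of _first_at_least in Source B
def pvFALLoop (s t : Int) (lo hi : Int) : Int :=
  if h : lo < hi then
    let mid := PySem.Int.floordiv (lo + hi) 2
    if 2 * t ≤ mid * (2 * s + 1 - mid) then
      pvFALLoop s t lo mid
    else
      pvFALLoop s t (mid + 1) hi
  else lo
termination_by (hi - lo).toNat
decreasing_by
  · have h1 := (PySem.Int.floordiv_two_mid_bounds (le_of_lt h)).1
    have h2 : PySem.Int.floordiv (lo + hi) 2 < hi :=
      (PySem.Int.floordiv_lt_iff_lt_mul (by omega)).2 (by omega)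
    omega
  · have h1 := (PySem.Int.floordiv_two_mid_bounds (le_of_lt h)).1
    have h2 : PySem.Int.floordiv (lo + hi) 2 < hi :=
      (PySem.Int.floordiv_lt_iff_lt_mul (by omega)).2 (by omega)
    omega

-- _first_at_least of Source B: smallest k in [1, s] with k*s - k*(k-1)//2 >= t, else s+1
def pvFirstAtLeast (s t : Int) : Int :=
  if t ≤ s then 1 else pvFALLoop s t 1 (s + 1)

-- the while loop of Source B emitting positions from step k while p < x_max and k <= s
-- (fuel (s + 1 - k).toNat + 1 only makes the recursion total; it is never exhausted)
def pvEmit (x_max s : Int) : Nat → Int → Int → List Int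
  | 0, _, _ => []
  | fuel+1, k, p =>
    if p < x_max ∧ k ≤ s then p :: pvEmit x_max s fuel (k + 1) (p + (s - k))
    else []

def get_x_values_alt (x_start_min : Int) (x_min : Int) (x_max : Int) : List (Int × List Int) :=
  ((PySem.List.pyRange 0 x_max 1).foldl
    (fun d s =>
      let k1 := pvFirstAtLeast s x_min
      let lst := pvEmit x_max s ((s + 1 - k1).toNat + 1) k1
        (PySem.Int.floordiv (k1 * (2 * s + 1 - k1)) 2)
      if lst.isEmpty then d else d.insert s lst)
    PySem.Dict.empty).items

-- ===== PRECONDITION & SPEC =====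
def Spec_get_x_values (x_start_min : Int) (x_min : Int) (x_max : Int) (out : List (Int × List Int)) : Prop := out = get_x_values_alt x_start_min x_min x_max
instance (x_start_min : Int) (x_min : Int) (x_max : Int) (out : List (Int × List Int)) : Decidable (Spec_get_x_values x_start_min x_min x_max out) := by unfold Spec_get_x_values; infer_instance

-- ===== CLAIM (what is proved, stated in full; the proofs are below) =====
def Claim_equal_get_x_values : Prop := ∀ (x_start_min : Int) (x_min : Int) (x_max : Int), Dom_get_x_values x_start_min x_min x_max → Spec_get_x_values x_start_min x_min x_max (get_x_values x_start_min x_min x_max)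

-- ===== LEMMAS AND PROOFS =====

-- closed-form position after k steps with start velocity s
def pvS (s k : Int) : Int := k * s - PySem.Int.floordiv (k * (k - 1)) 2

theorem pvS_succ (s k : Int) : pvS s (k + 1) = pvS s k + (s - k) := by
  obtain ⟨m, hm⟩ : Even (k * (k - 1)) := by
    have := Int.even_mul_succ_self (k - 1)
    simpa [mul_comm, sub_add_cancel] using this
  have hm2 : k * (k - 1) = 2 * m := by omega
  have e1 : (k + 1) * (k + 1 - 1) = 2 * (m + k) := by
    have : (k + 1) * (k + 1 - 1) = k * (k - 1) + 2 * k := by ring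
    omega
  have f1 : PySem.Int.floordiv (k * (k - 1)) 2 = m := by
    rw [hm2, PySem.Int.floordiv_eq_ediv_of_pos (by norm_num)]
    exact Int.mul_ediv_cancel_left m (by norm_num)
  have f2 : PySem.Int.floordiv ((k + 1) * (k + 1 - 1)) 2 = m + k := by
    rw [e1, PySem.Int.floordiv_eq_ediv_of_pos (by norm_num)]
    exact Int.mul_ediv_cancel_left (m + k) (by norm_num)
  unfold pvS
  rw [f1, f2]
  ring

theorem pvS_mono (s k k' : Int) (h0 : 0 ≤ k) (hkk : k ≤ k') (hks : k' ≤ s) :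
    pvS s k ≤ pvS s k' := by
  have key : ∀ n : Nat, ∀ k' : Int, k ≤ k' → k' ≤ s → (k' - k).toNat = n → pvS s k ≤ pvS s k' := by
    intro n
    induction n with
    | zero => intro k' h1 _ h3; have : k' = k := by omega
              rw [this]
    | succ n ih =>
      intro k' h1 h2 h3
      have hk1 : k ≤ k' - 1 := by omega
      have step : pvS s k' = pvS s (k' - 1) + (s - (k' - 1)) := by
        have := pvS_succ s (k' - 1)
        simpa using this
      have hle : pvS s k ≤ pvS s (k' - 1) := ih (k' - 1) hk1 (by omega) (by omega)
      omega
  exact key (k' - k).toNat k' hkk hks rfl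

theorem pvS_double (s k : Int) : k * (2 * s + 1 - k) = 2 * pvS s k := by
  obtain ⟨m, hm⟩ : Even (k * (k - 1)) := by
    have := Int.even_mul_succ_self (k - 1)
    simpa [mul_comm, sub_add_cancel] using this
  have hm2 : k * (k - 1) = 2 * m := by omega
  have f1 : PySem.Int.floordiv (k * (k - 1)) 2 = m := by
    rw [hm2, PySem.Int.floordiv_eq_ediv_of_pos (by norm_num)]
    exact Int.mul_ediv_cancel_left m (by norm_num)
  unfold pvS
  rw [f1]
  nlinarith [hm2]

theorem pvS_p0 (s k : Int) : PySem.Int.floordiv (k * (2 * s + 1 - k)) 2 = pvS s k := by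
  rw [pvS_double, PySem.Int.floordiv_eq_ediv_of_pos (by norm_num)]
  exact Int.mul_ediv_cancel_left _ (by norm_num)

theorem pvS_zero (s : Int) : pvS s 0 = 0 := by
  simp [pvS]

theorem pvS_one (s : Int) : pvS s 1 = s := by
  have h := pvS_succ s 0
  have h0 := pvS_zero s
  simp at h
  omega

-- binary-search correctness for pvFALLoop / pvFirstAtLeast
theorem pvFALLoop_spec (s t : Int) (lo hi : Int) (hlo : 1 ≤ lo) (hlh : lo ≤ hi) (hhi : hi ≤ s + 1)
    (hlow : ∀ k, 1 ≤ k → k < lo → pvS s k < t)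
    (hhigh : ∀ k, hi ≤ k → k ≤ s → t ≤ pvS s k) :
    (1 ≤ pvFALLoop s t lo hi ∧ pvFALLoop s t lo hi ≤ s + 1) ∧
    (∀ k, 1 ≤ k → k < pvFALLoop s t lo hi → pvS s k < t) ∧
    (∀ k, pvFALLoop s t lo hi ≤ k → k ≤ s → t ≤ pvS s k) := by
  have main : ∀ n : Nat, ∀ lo hi : Int, (hi - lo).toNat ≤ n → 1 ≤ lo → lo ≤ hi → hi ≤ s + 1 →
      (∀ k, 1 ≤ k → k < lo → pvS s k < t) → (∀ k, hi ≤ k → k ≤ s → t ≤ pvS s k) →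
      (1 ≤ pvFALLoop s t lo hi ∧ pvFALLoop s t lo hi ≤ s + 1) ∧
      (∀ k, 1 ≤ k → k < pvFALLoop s t lo hi → pvS s k < t) ∧
      (∀ k, pvFALLoop s t lo hi ≤ k → k ≤ s → t ≤ pvS s k) := by
    intro n
    induction n with
    | zero =>
      intro lo hi hn h1 h2 h3 hl hh
      have heq : ¬ lo < hi := by omega
      rw [pvFALLoop]
      simp only [heq, dite_false]
      exact ⟨⟨h1, by omega⟩, hl, fun k hk hks => hh k (by omega) hks⟩
    | succ n ih =>
      intro lo hi hn h1 h2 h3 hl hh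
      by_cases hlt : lo < hi
      · rw [pvFALLoop]
        simp only [hlt, dite_true]
        have hb := PySem.Int.floordiv_two_mid_bounds (le_of_lt hlt)
        have hmlt : PySem.Int.floordiv (lo + hi) 2 < hi :=
          (PySem.Int.floordiv_lt_iff_lt_mul (by omega)).2 (by omega)
        set mid := PySem.Int.floordiv (lo + hi) 2 with hmid
        have hdbl := pvS_double s mid
        by_cases hp : 2 * t ≤ mid * (2 * s + 1 - mid)
        · simp only [hp, if_true]
          apply ih lo mid (by omega) h1 (by omega) (by omega) hl
          intro k hk hks
          have hmono : pvS s mid ≤ pvS s k := pvS_mono s mid k (by omega) hk hks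
          have hpm : t ≤ pvS s mid := by omega
          omega
        · simp only [hp, if_false]
          apply ih (mid + 1) hi (by omega) (by omega) (by omega) h3 ?_ hh
          intro k hk hkm
          by_cases hklo : k < lo
          · exact hl k hk hklo
          · have hmono : pvS s k ≤ pvS s mid := pvS_mono s k mid (by omega) (by omega) (by omega)
            have hpm : pvS s mid < t := by omega
            omega
      · rw [pvFALLoop]
        simp only [hlt, dite_false]
        exact ⟨⟨h1, by omega⟩, hl, fun k hk hks => hh k (by omega) hks⟩
  exact main (hi - lo).toNat lo hi le_rfl hlo hlh hhi hlow hhigh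

theorem pvFAL_spec (s t : Int) (hs : 0 ≤ s) :
    (1 ≤ pvFirstAtLeast s t ∧ pvFirstAtLeast s t ≤ s + 1) ∧
    (∀ k, 1 ≤ k → k < pvFirstAtLeast s t → pvS s k < t) ∧
    (∀ k, pvFirstAtLeast s t ≤ k → k ≤ s → t ≤ pvS s k) := by
  unfold pvFirstAtLeast
  by_cases hfast : t ≤ s
  · simp only [hfast, if_true]
    refine ⟨⟨le_rfl, by omega⟩, fun k hk hk1 => by omega, fun k hk hks => ?_⟩
    have hmono : pvS s 1 ≤ pvS s k := pvS_mono s 1 k (by omega) hk hks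
    rw [pvS_one] at hmono
    omega
  · simp only [hfast, if_false]
    exact pvFALLoop_spec s t 1 (s + 1) le_rfl (by omega) le_rfl
      (fun k hk hk1 => by omega) (fun k hk hks => by omega)

-- the emit loop produces exactly the positions of steps [k, k2)
theorem pvEmit_eq (x_max s k2 : Int) (hb2 : 1 ≤ k2 ∧ k2 ≤ s + 1)
    (h2l : ∀ k, 1 ≤ k → k < k2 → pvS s k < x_max)
    (h2h : ∀ k, k2 ≤ k → k ≤ s → x_max ≤ pvS s k) :
    ∀ (fuel : Nat) (k : Int), 1 ≤ k → k ≤ s + 1 → (s + 1 - k).toNat < fuel →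
    pvEmit x_max s fuel k (pvS s k) = (PySem.List.pyRange k k2 1).map (pvS s) := by
  intro fuel
  induction fuel with
  | zero => intro k _ _ hf; omega
  | succ f ih =>
    intro k hk1 hks hf
    by_cases hc : pvS s k < x_max ∧ k ≤ s
    · have hkk2 : k < k2 := by
        by_contra hge
        exact absurd hc.1 (not_lt.2 (h2h k (by omega) hc.2))
      have hx' : pvS s k + (s - k) = pvS s (k + 1) := by
        have := pvS_succ s k; omega
      simp only [pvEmit, if_pos hc]
      rw [hx', ih (k + 1) (by omega) (by omega) (by omega),
        PySem.List.pyRange_one_cons hkk2]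
      simp
    · simp only [pvEmit, if_neg hc]
      have hk2k : k2 ≤ k := by
        by_cases hsk : k ≤ s
        · by_contra hlt
          exact hc ⟨h2l k hk1 (by omega), hsk⟩
        · omega
      rw [PySem.List.pyRange_one_eq_nil hk2k]
      simp

-- recorded positions of A's inner loop, as a plain list
def pvRec (x_min x_max : Int) : Nat → Int → Int → List Int
  | 0, _, _ => []
  | fuel+1, x, x_i =>
    if x < x_max then
      if x_i = 0 then []
      else (if x_min ≤ x + x_i ∧ x + x_i < x_max then [x + x_i] else []) ++
        pvRec x_min x_max fuel (x + x_i) (x_i - 1)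
    else []

-- A's inner loop only appends to the key x_start
def pvPush (s : Int) (d : PySem.Dict Int (List Int)) (l : List Int) : PySem.Dict Int (List Int) :=
  l.foldl (fun d e =>
    match d.get? s with
    | some m => d.insert s (m ++ [e])
    | none => d.insert s [e]) d

theorem pvLoopA_eq_push (x_min x_max s : Int) :
    ∀ (fuel : Nat) (x x_i : Int) (d : PySem.Dict Int (List Int)),
    pvLoopA x_min x_max s fuel x x_i d = pvPush s d (pvRec x_min x_max fuel x x_i) := by
  intro fuel
  induction fuel with
  | zero => intro x x_i d; simp [pvLoopA, pvRec, pvPush]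
  | succ f ih =>
    intro x x_i d
    by_cases h1 : x < x_max
    · by_cases h2 : x_i = 0
      · simp [pvLoopA, pvRec, pvPush, h1, h2]
      · by_cases h3 : x_min ≤ x + x_i ∧ x + x_i < x_max
        · simp only [pvLoopA, pvRec, if_pos h1, if_neg h2, if_pos h3]
          rw [ih]
          simp [pvPush]
        · simp only [pvLoopA, pvRec, if_pos h1, if_neg h2, if_neg h3]
          rw [ih]
          simp [pvPush]
    · simp [pvLoopA, pvRec, pvPush, h1]

theorem pv_insert_insert (d : PySem.Dict Int (List Int)) (s : Int) (a b : List Int) :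
    (d.insert s a).insert s b = d.insert s b := by
  apply PySem.Dict.ext
  by_cases hc : d.contains s
  · rw [PySem.Dict.items_insert_of_contains (d.insert s a) b (PySem.Dict.contains_insert_self d s a),
      PySem.Dict.items_insert_of_contains d a hc, PySem.Dict.items_insert_of_contains d b hc,
      List.map_map]
    apply List.map_congr_left
    intro p _
    by_cases he : p.1 = s <;> simp [he]
  · have hc' : d.contains s = false := by simpa using hc
    rw [PySem.Dict.items_insert_of_contains (d.insert s a) b (PySem.Dict.contains_insert_self d s a),
      PySem.Dict.items_insert_of_not_contains d a hc',
      PySem.Dict.items_insert_of_not_contains d b hc', List.map_append]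
    have hmap : d.items.map (fun p => if p.1 == s then (s, b) else p) = d.items := by
      conv_rhs => rw [← List.map_id d.items]
      apply List.map_congr_left
      intro p hp
      have hps : p.1 ≠ s := by
        intro he
        have : s ∈ d.keys := by
          rw [← he]
          exact PySem.Dict.mem_keys_of_mem_items d hp
        rw [← PySem.Dict.contains_iff_mem_keys d s] at this
        simp [hc'] at this
      simp [hps]
    rw [hmap]
    simp

theorem pv_insert_get_eq (d : PySem.Dict Int (List Int)) (s : Int) (m : List Int)
    (hn : d.keys.Nodup) (h : d.get? s = some m) : d.insert s m = d := by
  apply PySem.Dict.ext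
  have hc : d.contains s = true := by
    rw [PySem.Dict.contains_eq_isSome_get? d s, h]; rfl
  rw [PySem.Dict.items_insert_of_contains d m hc]
  conv_rhs => rw [← List.map_id d.items]
  apply List.map_congr_left
  intro p hp
  by_cases he : p.1 = s
  · have hg : d.get? p.1 = some p.2 := PySem.Dict.get?_of_mem_items d (by simpa using hp) hn
    rw [he, h] at hg
    have hpm : p.2 = m := (Option.some.inj hg).symm
    have hsp : (s, m) = p := by rw [← he, ← hpm]
    simp [he, hsp]
  · simp [he]

theorem pvPush_present (s : Int) :
    ∀ (l : List Int) (d : PySem.Dict Int (List Int)) (m : List Int),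
    d.keys.Nodup → d.get? s = some m → pvPush s d l = d.insert s (m ++ l) := by
  intro l
  induction l with
  | nil => intro d m hn h; simpa [pvPush] using (pv_insert_get_eq d s m hn h).symm
  | cons e l ih =>
    intro d m hn h
    have hstep : pvPush s d (e :: l) = pvPush s (d.insert s (m ++ [e])) l := by
      simp [pvPush, h]
    rw [hstep, ih (d.insert s (m ++ [e])) (m ++ [e]) (PySem.Dict.nodup_keys_insert d s _ hn)
      (by simp [PySem.Dict.get?_insert_self]), pv_insert_insert]
    simp

theorem pvPush_fresh (s : Int) (d : PySem.Dict Int (List Int)) (l : List Int)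
    (hn : d.keys.Nodup) (hc : d.contains s = false) :
    pvPush s d l = if l = [] then d else d.insert s l := by
  cases l with
  | nil => simp [pvPush]
  | cons e l =>
    have hg : d.get? s = none := by
      rw [PySem.Dict.get?_eq_none_iff_contains d s]; exact hc
    have hstep : pvPush s d (e :: l) = pvPush s (d.insert s [e]) l := by
      simp [pvPush, hg]
    rw [hstep, pvPush_present s l (d.insert s [e]) [e] (PySem.Dict.nodup_keys_insert d s _ hn)
      (by simp [PySem.Dict.get?_insert_self]), pv_insert_insert]
    simp

theorem pvRec_char (x_min x_max s : Int) (hs : 0 ≤ s) :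
    ∀ (fuel : Nat) (j : Int), 0 ≤ j → j ≤ s → (s - j).toNat < fuel →
    pvRec x_min x_max fuel (pvS s j) (s - j) =
      ((PySem.List.pyRange (j + 1) (s + 1) 1).filter
        (fun k => decide (x_min ≤ pvS s k ∧ pvS s k < x_max))).map (pvS s) := by
  intro fuel
  induction fuel with
  | zero => intro j _ _ hf; omega
  | succ f ih =>
    intro j h0 hj hf
    by_cases hbreak : pvS s j < x_max
    · by_cases hjs : s - j = 0
      · have hnil : PySem.List.pyRange (j + 1) (s + 1) 1 = [] :=
          PySem.List.pyRange_one_eq_nil (by omega)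
        simp [pvRec, hbreak, hjs, hnil]
      · have hx' : pvS s j + (s - j) = pvS s (j + 1) := by
          have := pvS_succ s j; omega
        simp only [pvRec, if_pos hbreak, if_neg hjs]
        rw [hx', show s - j - 1 = s - (j + 1) by omega,
          ih (j + 1) (by omega) (by omega) (by omega),
          PySem.List.pyRange_one_cons (by omega : j + 1 < s + 1), List.filter_cons]
        by_cases hc : x_min ≤ pvS s (j + 1) ∧ pvS s (j + 1) < x_max
        · simp [hc]
        · simp [hc]
    · simp only [pvRec, if_neg hbreak]
      symm
      simp only [List.map_eq_nil_iff, List.filter_eq_nil_iff]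
      intro k hk
      rw [PySem.List.mem_pyRange_one] at hk
      have hmono : pvS s j ≤ pvS s k := pvS_mono s j k h0 (by omega) (by omega)
      simp only [decide_eq_true_eq, not_and, not_lt]
      intro _
      omega

theorem pv_filter_range (x_min x_max s k1 k2 : Int)
    (hb1 : 1 ≤ k1 ∧ k1 ≤ s + 1) (hb2 : 1 ≤ k2 ∧ k2 ≤ s + 1)
    (h1l : ∀ k, 1 ≤ k → k < k1 → pvS s k < x_min)
    (h1h : ∀ k, k1 ≤ k → k ≤ s → x_min ≤ pvS s k)
    (h2l : ∀ k, 1 ≤ k → k < k2 → pvS s k < x_max)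
    (h2h : ∀ k, k2 ≤ k → k ≤ s → x_max ≤ pvS s k) :
    ∀ (n : Nat) (a : Int), 1 ≤ a → a ≤ s + 1 → (s + 1 - a).toNat ≤ n →
    (PySem.List.pyRange a (s + 1) 1).filter
        (fun k => decide (x_min ≤ pvS s k ∧ pvS s k < x_max)) =
      PySem.List.pyRange (max a k1) k2 1 := by
  intro n
  induction n with
  | zero =>
    intro a h1 h2 hn
    have ha : a = s + 1 := by omega
    rw [ha, PySem.List.pyRange_one_eq_nil le_rfl, PySem.List.pyRange_one_eq_nil (by omega)]
    simp
  | succ n ih =>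
    intro a h1 h2 hn
    by_cases has : a ≤ s
    · rw [PySem.List.pyRange_one_cons (by omega : a < s + 1), List.filter_cons]
      have hiff1 : (x_min ≤ pvS s a) ↔ k1 ≤ a := by
        constructor
        · intro h; by_contra hlt; exact absurd h (not_le.2 (h1l a h1 (by omega)))
        · intro h; exact h1h a h has
      have hiff2 : (pvS s a < x_max) ↔ a < k2 := by
        constructor
        · intro h; by_contra hlt; exact absurd h (not_lt.2 (h2h a (by omega) has))
        · intro h; exact h2l a h1 h
      by_cases hc : x_min ≤ pvS s a ∧ pvS s a < x_max
      · have hk1a : k1 ≤ a := hiff1.1 hc.1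
        have hak2 : a < k2 := hiff2.1 hc.2
        rw [ih (a + 1) (by omega) (by omega) (by omega)]
        have hmx : max a k1 = a := by omega
        have hmx' : max (a + 1) k1 = a + 1 := by omega
        rw [hmx, hmx', PySem.List.pyRange_one_cons hak2]
        simp [hc]
      · rw [if_neg (by simpa using hc)]
        rw [ih (a + 1) (by omega) (by omega) (by omega)]
        by_cases hk1a : a < k1
        · have hmx : max a k1 = k1 := by omega
          have hmx' : max (a + 1) k1 = k1 := by omega
          rw [hmx, hmx']
        · have hk2a : k2 ≤ a := by
            by_contra hk2a
            exact hc ⟨hiff1.2 (by omega), hiff2.2 (by omega)⟩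
          rw [PySem.List.pyRange_one_eq_nil (by omega), PySem.List.pyRange_one_eq_nil (by omega)]
    · have ha : a = s + 1 := by omega
      rw [ha, PySem.List.pyRange_one_eq_nil le_rfl, PySem.List.pyRange_one_eq_nil (by omega)]
      simp

theorem pvRec_eq_bList (x_min x_max s : Int) (hs : 0 ≤ s) :
    pvRec x_min x_max (s.toNat + 1) 0 s =
      (PySem.List.pyRange (pvFirstAtLeast s x_min) (pvFirstAtLeast s x_max) 1).map (pvS s) := by
  have h1 := pvFAL_spec s x_min hs
  have h2 := pvFAL_spec s x_max hs
  have hS0 : pvS s 0 = 0 := pvS_zero s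
  have hrc := pvRec_char x_min x_max s hs (s.toNat + 1) 0 le_rfl hs (by omega)
  rw [hS0, sub_zero] at hrc
  rw [show (0:Int) + 1 = 1 by norm_num] at hrc
  rw [hrc, pv_filter_range x_min x_max s _ _ h1.1 h2.1 h1.2.1 h1.2.2 h2.2.1 h2.2.2
    (s + 1 - 1).toNat 1 le_rfl (by omega) le_rfl]
  have hmx : max 1 (pvFirstAtLeast s x_min) = pvFirstAtLeast s x_min := by
    have := h1.1.1; omega
  rw [hmx]

theorem pv_outer (x_min x_max : Int) :
    ∀ (n : Nat) (a : Int) (d : PySem.Dict Int (List Int)), 0 ≤ a → (x_max - a).toNat ≤ n →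
    d.keys.Nodup → (∀ k ∈ d.keys, k < a) →
    (PySem.List.pyRange a x_max 1).foldl
      (fun d x_start => pvLoopA x_min x_max x_start (x_start.toNat + 1) 0 x_start d) d =
    (PySem.List.pyRange a x_max 1).foldl
      (fun d s =>
        let k1 := pvFirstAtLeast s x_min
        let lst := pvEmit x_max s ((s + 1 - k1).toNat + 1) k1
          (PySem.Int.floordiv (k1 * (2 * s + 1 - k1)) 2)
        if lst.isEmpty then d else d.insert s lst) d := by
  intro n
  induction n with
  | zero =>
    intro a d ha hn _ _
    rw [PySem.List.pyRange_one_eq_nil (by omega)]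
    simp
  | succ n ih =>
    intro a d ha hn hnodup hkeys
    by_cases hax : a < x_max
    · rw [PySem.List.pyRange_one_cons hax]
      simp only [List.foldl_cons]
      have hcont : d.contains a = false := by
        by_contra hcon
        have hmem : a ∈ d.keys := (PySem.Dict.contains_iff_mem_keys d a).1 (by simpa using hcon)
        exact absurd (hkeys a hmem) (lt_irrefl a)
      have hk1s := pvFAL_spec a x_min ha
      have hk2s := pvFAL_spec a x_max ha
      have hlstEq : pvEmit x_max a ((a + 1 - pvFirstAtLeast a x_min).toNat + 1)
          (pvFirstAtLeast a x_min)
          (PySem.Int.floordiv (pvFirstAtLeast a x_min * (2 * a + 1 - pvFirstAtLeast a x_min)) 2)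
          = (PySem.List.pyRange (pvFirstAtLeast a x_min) (pvFirstAtLeast a x_max) 1).map (pvS a) := by
        rw [pvS_p0]
        exact pvEmit_eq x_max a _ hk2s.1 hk2s.2.1 hk2s.2.2 _ _ hk1s.1.1 hk1s.1.2 (by omega)
      have hstep : pvLoopA x_min x_max a (a.toNat + 1) 0 a d =
          (let k1 := pvFirstAtLeast a x_min
           let lst := pvEmit x_max a ((a + 1 - k1).toNat + 1) k1
             (PySem.Int.floordiv (k1 * (2 * a + 1 - k1)) 2)
           if lst.isEmpty then d else d.insert a lst) := by
        simp only []
        rw [hlstEq, pvLoopA_eq_push, pvRec_eq_bList x_min x_max a ha,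
          pvPush_fresh a d _ hnodup hcont]
        simp only [List.isEmpty_iff]
      rw [hstep]
      simp only []
      rw [hlstEq]
      set lst := (PySem.List.pyRange (pvFirstAtLeast a x_min) (pvFirstAtLeast a x_max) 1).map (pvS a)
        with hlst
      apply ih (a + 1) _ (by omega) (by omega)
      · by_cases hemp : lst.isEmpty
        · rw [if_pos hemp]; exact hnodup
        · rw [if_neg hemp]
          exact PySem.Dict.nodup_keys_insert d a lst hnodup
      · intro k hk
        by_cases hemp : lst.isEmpty
        · rw [if_pos hemp] at hk
          exact lt_trans (hkeys k hk) (by omega)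
        · rw [if_neg hemp] at hk
          rcases (PySem.Dict.mem_keys_insert d a k lst).1 hk with h | h
          · omega
          · exact lt_trans (hkeys k h) (by omega)
    · rw [PySem.List.pyRange_one_eq_nil (by omega)]
      simp

-- ===== VERDICT (by name: the statement is the Claim_ definition above) =====
theorem get_x_values_spec : Claim_equal_get_x_values := by
  intro x_start_min x_min x_max _
  unfold Spec_get_x_values get_x_values get_x_values_alt
  have h := pv_outer x_min x_max (x_max - 0).toNat 0 PySem.Dict.empty le_rfl le_rfl
    (by simp) (by simp)
  rw [h]
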